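-- pv_equiv track=rewrite | github.com/KIRAN3031/Python_Programming | Day3/String/highest_freq.py | high_freq
-- ===== SOURCE A (Python) =====
-- def high_freq(s):
--     s= s.lower()
--     si=''
--     val=s[0]
--     ma = s.count(s[0])
--     for i in s:
--         if i not in si:
--             j = s.count(i)
--             si+=i
--             if j>ma:
--                 ma=j
--                 val=i
--
--     return val,ma
-- ===== SOURCE B (Python) =====
-- def high_freq(s):
--     s = s.lower()
--     counts = {}
--     for c in s:
--         counts[c] = counts.get(c, 0) + 1
--     first_idx = {}
--     for i, c in enumerate(s):
--         if c not in first_idx: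
--             first_idx[c] = i
--     ranked = sorted(counts, key=lambda c: (-counts[c], first_idx[c]))
--     val = ranked[0]
--     return val, counts[val]
-- ===== Notes on version B (the rewrite author's own statement) =====
-- stated objective: alternative
-- what changed: A's running-max scan that calls s.count inside the loop is replaced by one counting pass, one first-index pass and a sort of the distinct characters by (-count, first index), taking the head.
import Mathlib
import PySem

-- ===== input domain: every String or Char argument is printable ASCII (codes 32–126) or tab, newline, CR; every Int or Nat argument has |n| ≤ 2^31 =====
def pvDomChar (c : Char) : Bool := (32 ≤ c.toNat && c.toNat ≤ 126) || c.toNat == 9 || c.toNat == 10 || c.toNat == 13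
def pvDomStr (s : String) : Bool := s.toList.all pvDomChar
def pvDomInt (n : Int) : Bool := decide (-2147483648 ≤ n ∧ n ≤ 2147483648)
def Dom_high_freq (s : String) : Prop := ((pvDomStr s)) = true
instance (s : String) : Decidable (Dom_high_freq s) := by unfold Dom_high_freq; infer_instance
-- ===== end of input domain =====

-- B replaces A's quadratic running-max scan (s.count inside the loop) by one counting pass,
-- one first-index pass and a sort of the distinct characters; same return value everywhere A returns.

-- ===== PORT A =====
-- the loop body of A: state (si, val, ma); 'i not in si' / 's.count(i)' on 1-char strings
def Astep (cs : List Char) (st : List Char × Char × Int) (i : Char) : List Char × Char × Int :=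
  if PySem.Chars.isIn [i] st.1 then st
  else
    let j : Int := (PySem.Chars.count cs [i] : Int)
    if j > st.2.2 then (st.1 ++ [i], i, j)
    else (st.1 ++ [i], st.2.1, st.2.2)

def high_freq (s : String) : String × Int :=
  let cs := PySem.Chars.lower s.toList
  match PySem.List.pyGet? cs 0 with
  | none => ("", 0)  -- Python: s[0] raises IndexError on empty s; excluded by Pre_
  | some c0 =>
    let r := cs.foldl (Astep cs) ([], c0, (PySem.Chars.count cs [c0] : Int))
    (String.ofList [r.2.1], r.2.2)

-- ===== PORT B =====
def high_freq_alt (s : String) : String × Int :=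
  let cs := PySem.Chars.lower s.toList
  let counts := cs.foldl (fun (d : PySem.Dict Char Int) c => d.insert c (d.getD c 0 + 1)) PySem.Dict.empty
  let firstidx := (PySem.List.enumerate cs).foldl
      (fun (d : PySem.Dict Char Int) p => if d.contains p.2 then d else d.insert p.2 p.1) PySem.Dict.empty
  let ranked := PySem.List.sorted2 counts.keys (fun c => -(counts.getD c 0)) (fun c => firstidx.getD c 0)
  match PySem.List.pyGet? ranked 0 with
  | none => ("", 0)  -- Python: ranked[0] raises IndexError on empty s; excluded by Pre_
  | some val => (String.ofList [val], counts.getD val 0)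

-- ===== PRECONDITION & SPEC =====
-- Pre_ excludes only the empty string, on which A raises IndexError (s[0]).
def Pre_high_freq (s : String) : Prop := s ≠ ""
instance (s : String) : Decidable (Pre_high_freq s) := by unfold Pre_high_freq; infer_instance
def pvWitness_high_freq : String := "aabba"
def Spec_high_freq (s : String) (out : String × Int) : Prop := out = high_freq_alt s
instance (s : String) (out : String × Int) : Decidable (Spec_high_freq s out) := by unfold Spec_high_freq; infer_instance

-- ===== CLAIM (what is proved, stated in full; the proofs are below) =====
def Claim_equal_high_freq : Prop := ∀ (s : String), Dom_high_freq s → Pre_high_freq s → Spec_high_freq s (high_freq s)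

-- ===== LEMMAS AND PROOFS =====

-- the winner both A and B return: a most frequent character, earliest first occurrence on ties
def Best (cs : List Char) (c : Char) : Prop :=
  c ∈ cs ∧ ∀ y ∈ cs, cs.count y ≤ cs.count c ∧ (cs.count y = cs.count c → cs.idxOf c ≤ cs.idxOf y)

lemma Best_unique {cs : List Char} {a b : Char} (ha : Best cs a) (hb : Best cs b) : a = b := by
  obtain ⟨hma, h1⟩ := ha
  obtain ⟨hmb, h2⟩ := hb
  have hcount : cs.count b = cs.count a := le_antisymm (h1 b hmb).1 (h2 a hma).1
  have hidx : cs.idxOf a = cs.idxOf b :=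
    le_antisymm ((h1 b hmb).2 hcount) ((h2 a hma).2 hcount.symm)
  have g1 := List.getElem_idxOf (List.idxOf_lt_length_of_mem hma)
  have g2 := List.getElem_idxOf (List.idxOf_lt_length_of_mem hmb)
  rw [← g1, ← g2]
  simp [hidx]

-- str.count with a single-character needle is the list count
lemma count_go_singleton (a : Char) :
    ∀ (fuel : Nat) (l : List Char) (acc : Nat), l.length ≤ fuel →
      PySem.Chars.count.go [a] fuel l acc = acc + l.count a := by
  intro fuel
  induction fuel with
  | zero =>
    intro l acc h
    have : l = [] := List.eq_nil_of_length_eq_zero (Nat.le_zero.mp h)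
    subst this
    rw [PySem.Chars.count.go]
    simp
  | succ f ih =>
    intro l acc h
    cases l with
    | nil => rw [PySem.Chars.count.go]; simp; omega
    | cons x t =>
      rw [PySem.Chars.count.go]
      by_cases hx : a = x
      · subst hx
        have hp : List.isPrefixOf [a] (a :: t) = true := by simp [List.isPrefixOf]
        simp only [hp, if_pos]
        rw [ih _ _ (by simpa using Nat.le_of_succ_le_succ h)]
        simp [List.count_cons]
        omega
      · have hp : List.isPrefixOf [a] (x :: t) = false := by
          simp [List.isPrefixOf]
          exact fun hcontra => hx hcontra
        simp only [hp, Bool.false_eq_true, if_false]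
        rw [ih _ _ (by simpa using Nat.le_of_succ_le_succ h)]
        have hxx : ¬ x = a := fun hc => hx hc.symm
        simp [List.count_cons, hxx]

lemma count_singleton (l : List Char) (a : Char) : PySem.Chars.count l [a] = l.count a := by
  simp only [PySem.Chars.count, List.isEmpty_cons, Bool.false_eq_true, if_false]
  rw [count_go_singleton a l.length l 0 le_rfl]
  omega

lemma isIn_singleton (i : Char) (si : List Char) : PySem.Chars.isIn [i] si = true ↔ i ∈ si := by
  rw [PySem.Chars.isIn_iff_infix]; exact List.singleton_infix_iff i si

-- A's loop invariant: the state is the best of the processed prefix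
lemma Aloop (cs : List Char) :
    ∀ (rest p si : List Char) (val : Char) (ma : Int),
      cs = p ++ rest →
      (∀ c, c ∈ si ↔ c ∈ p) →
      val ∈ cs → ma = (cs.count val : Int) →
      (∀ y ∈ p, cs.count y ≤ cs.count val) →
      (∀ y ∈ p, cs.count y = cs.count val → cs.idxOf val ≤ cs.idxOf y) →
      cs.idxOf val ≤ p.length →
      Best cs (rest.foldl (Astep cs) (si, val, ma)).2.1 ∧
        (rest.foldl (Astep cs) (si, val, ma)).2.2 =
          (cs.count (rest.foldl (Astep cs) (si, val, ma)).2.1 : Int) := by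
  intro rest
  induction rest with
  | nil =>
    intro p si val ma hsplit hsi hval hma hle htie hidx
    simp only [List.foldl_nil]
    refine ⟨⟨hval, ?_⟩, hma⟩
    intro y hy
    have hyp : y ∈ p := by rw [hsplit] at hy; simpa using hy
    exact ⟨hle y hyp, htie y hyp⟩
  | cons i rest ih =>
    intro p si val ma hsplit hsi hval hma hle htie hidx
    simp only [List.foldl_cons]
    have hsplit' : cs = (p ++ [i]) ++ rest := by simp [hsplit]
    by_cases hmem : i ∈ si
    · -- seen before: state unchanged
      have hb : PySem.Chars.isIn [i] si = true := (isIn_singleton i si).mpr hmem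
      have hstep : Astep cs (si, val, ma) i = (si, val, ma) := by
        simp [Astep, hb]
      rw [hstep]
      have hip : i ∈ p := (hsi i).mp hmem
      refine ih (p ++ [i]) si val ma hsplit' ?_ hval hma ?_ ?_ ?_
      · intro c; rw [hsi c]; constructor
        · intro h; exact List.mem_append_left _ h
        · intro h; rcases List.mem_append.mp h with h | h
          · exact h
          · rcases List.mem_singleton.mp h with rfl; exact hip
      · intro y hy; rcases List.mem_append.mp hy with h | h
        · exact hle y h
        · rw [List.mem_singleton] at h; rw [h]; exact hle i hip
      · intro y hy; rcases List.mem_append.mp hy with h | h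
        · exact htie y h
        · rw [List.mem_singleton] at h; rw [h]; exact htie i hip
      · simp; omega
    · -- new character
      have hb : PySem.Chars.isIn [i] si = false := by
        cases h : PySem.Chars.isIn [i] si with
        | false => rfl
        | true => exact absurd ((isIn_singleton i si).mp h) hmem
      have hip : i ∉ p := fun h => hmem ((hsi i).mpr h)
      have hidxi : cs.idxOf i = p.length := by
        rw [hsplit, List.idxOf_append_of_notMem hip]
        simp
      have hics : i ∈ cs := by rw [hsplit]; simp
      by_cases hgt : (cs.count i : Int) > ma
      · have hstep : Astep cs (si, val, ma) i = (si ++ [i], i, (cs.count i : Int)) := by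
          simp [Astep, hb, count_singleton, hgt]
        rw [hstep]
        have hcnt : cs.count val < cs.count i := by
          rw [hma] at hgt; exact_mod_cast hgt
        refine ih (p ++ [i]) (si ++ [i]) i (cs.count i : Int) hsplit' ?_ hics rfl ?_ ?_ ?_
        · intro c; simp [hsi c]
        · intro y hy; rcases List.mem_append.mp hy with h | h
          · exact le_of_lt (lt_of_le_of_lt (hle y h) hcnt)
          · rw [List.mem_singleton] at h; rw [h]
        · intro y hy; rcases List.mem_append.mp hy with h | h
          · intro hcy; exact absurd hcy (Nat.ne_of_lt (lt_of_le_of_lt (hle y h) hcnt))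
          · rw [List.mem_singleton] at h; rw [h]; intro _; exact le_rfl
        · simp [hidxi]
      · have hstep : Astep cs (si, val, ma) i = (si ++ [i], val, ma) := by
          simp [Astep, hb, count_singleton, hgt]
        rw [hstep]
        have hcnt : cs.count i ≤ cs.count val := by
          rw [hma] at hgt; exact_mod_cast not_lt.mp hgt
        refine ih (p ++ [i]) (si ++ [i]) val ma hsplit' ?_ hval hma ?_ ?_ ?_
        · intro c; simp [hsi c]
        · intro y hy; rcases List.mem_append.mp hy with h | h
          · exact hle y h
          · rw [List.mem_singleton] at h; rw [h]; exact hcnt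
        · intro y hy; rcases List.mem_append.mp hy with h | h
          · exact htie y h
          · rw [List.mem_singleton] at h; rw [h]; intro _; rw [hidxi]; exact hidx
        · simp; omega

-- first_idx dict: get? is the first index of the character
lemma fi_get (c : Char) :
    ∀ (cs : List Char) (st : Int) (d : PySem.Dict Char Int),
      ((PySem.List.enumerate cs st).foldl
          (fun (d : PySem.Dict Char Int) p => if d.contains p.2 then d else d.insert p.2 p.1) d).get? c
        = (d.get? c).or ((PySem.List.index? cs c).map (fun k => st + (k : Int))) := by
  intro cs
  induction cs with
  | nil => intro st d; simp [PySem.List.enumerate_nil, PySem.List.index?_eq_idxOf?]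
  | cons x xs ih =>
    intro st d
    rw [PySem.List.enumerate_cons]
    simp only [List.foldl_cons]
    rw [ih]
    by_cases hc : c = x
    · subst hc
      by_cases hd : d.contains c
      · simp only [hd, if_pos]
        obtain ⟨v, hv⟩ : ∃ v, d.get? c = some v := by
          rw [PySem.Dict.contains_eq_isSome_get?] at hd
          exact Option.isSome_iff_exists.mp hd
        simp [hv, PySem.List.index?_eq_idxOf?, List.idxOf?_cons]
      · simp only [hd, if_neg, Bool.false_eq_true, if_false]
        have hnone : d.get? c = none := by
          rw [PySem.Dict.contains_eq_isSome_get?] at hd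
          simpa using hd
        rw [PySem.Dict.get?_insert_self]
        simp [hnone, PySem.List.index?_eq_idxOf?, List.idxOf?_cons]
    · have hg : ∀ (d' : PySem.Dict Char Int), (if d.contains x then d else d.insert x st).get? c = d.get? c := by
        intro _
        by_cases hd : d.contains x
        · simp [hd]
        · simp only [hd, Bool.false_eq_true, if_false]
          exact PySem.Dict.get?_insert_of_ne d st hc
      rw [hg d]
      have hxc : ¬ x = c := fun h => hc h.symm
      have hix : PySem.List.index? (x :: xs) c = (PySem.List.index? xs c).map (· + 1) := by
        simp [PySem.List.index?_eq_idxOf?, List.idxOf?_cons, hxc]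
      rw [hix]
      cases hq : PySem.List.index? xs c with
      | none => simp [hq]
      | some k =>
        simp [hq]
        push_cast
        ring

-- pairwise order of insertion sort under a total transitive relation compatible with `before`
lemma insertBy_pairwise {α : Type} (le : α → α → Prop) (before : α → α → Bool)
    (htrans : ∀ {a b c}, le a b → le b c → le a c)
    (hT : ∀ a b, before a b = true → le a b) (hF : ∀ a b, before a b = false → le b a)
    (x : α) (acc : List α) (h : acc.Pairwise le) :
    (PySem.List.insertBy before x acc).Pairwise le := by
  induction acc with
  | nil => rw [PySem.List.insertBy]; simp
  | cons y ys ih =>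
    rw [PySem.List.insertBy]
    rcases List.pairwise_cons.mp h with ⟨hy, hys⟩
    by_cases hb : before x y = true
    · simp only [hb, if_pos]
      refine List.pairwise_cons.mpr ⟨?_, h⟩
      intro z hz
      rcases List.mem_cons.mp hz with rfl | hz'
      · exact hT _ _ hb
      · exact htrans (hT _ _ hb) (hy z hz')
    · have hb' : before x y = false := by simpa using hb
      simp only [hb', Bool.false_eq_true, if_false]
      refine List.pairwise_cons.mpr ⟨?_, ih hys⟩
      intro z hz
      rcases (PySem.List.mem_insertBy _ _ _ _).mp hz with rfl | hz'
      · exact hF _ _ hb'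
      · exact hy z hz'

lemma foldl_insertBy_pairwise {α : Type} (le : α → α → Prop) (before : α → α → Bool)
    (htrans : ∀ {a b c}, le a b → le b c → le a c)
    (hT : ∀ a b, before a b = true → le a b) (hF : ∀ a b, before a b = false → le b a)
    (xs : List α) :
    ∀ acc : List α, acc.Pairwise le →
      (xs.foldl (fun acc x => PySem.List.insertBy before x acc) acc).Pairwise le := by
  induction xs with
  | nil => intro acc h; simpa using h
  | cons x xs ih =>
    intro acc h
    simp only [List.foldl_cons]
    exact ih _ (insertBy_pairwise le before htrans hT hF x acc h)

lemma sorted2_pairwise_le {α : Type} (xs : List α) (k1 k2 : α → Int) :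
    (PySem.List.sorted2 xs k1 k2 false).Pairwise
      (fun a b => k1 a < k1 b ∨ (k1 a = k1 b ∧ k2 a ≤ k2 b)) := by
  have h := foldl_insertBy_pairwise
    (fun a b => k1 a < k1 b ∨ (k1 a = k1 b ∧ k2 a ≤ k2 b))
    (fun a b => decide (k1 a < k1 b) || (!decide (k1 b < k1 a) && decide (k2 a < k2 b)))
    (by
      intro a b c hab hbc
      rcases hab with h1 | ⟨h1, h2⟩ <;> rcases hbc with h3 | ⟨h3, h4⟩
      · exact Or.inl (lt_trans h1 h3)
      · exact Or.inl (h3 ▸ h1)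
      · exact Or.inl (h1 ▸ h3)
      · exact Or.inr ⟨h1.trans h3, le_trans h2 h4⟩)
    (by
      intro a b hab
      simp only [Bool.or_eq_true, Bool.and_eq_true, Bool.not_eq_true', decide_eq_true_eq,
        decide_eq_false_iff_not] at hab
      rcases hab with h1 | ⟨h1, h2⟩
      · exact Or.inl h1
      · rcases lt_or_ge (k1 a) (k1 b) with h | h
        · exact Or.inl h
        · exact Or.inr ⟨by omega, by omega⟩)
    (by
      intro a b hab
      simp only [Bool.or_eq_false_iff, Bool.and_eq_false_iff, Bool.not_eq_false', decide_eq_true_eq,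
        decide_eq_false_iff_not] at hab
      rcases hab with ⟨h1, h2 | h2⟩
      · exact Or.inl h2
      · rcases lt_or_ge (k1 b) (k1 a) with h | h
        · exact Or.inl h
        · exact Or.inr ⟨by omega, by omega⟩)
    xs [] (List.Pairwise.nil)
  simpa [PySem.List.sorted2] using h

lemma idxOf?_mem (xs : List Char) (c : Char) (h : c ∈ xs) :
    List.idxOf? c xs = some (xs.idxOf c) := by
  induction xs with
  | nil => simp at h
  | cons x t ih =>
    by_cases hx : x = c
    · subst hx; simp [List.idxOf?_cons]
    · rcases List.mem_cons.mp h with h' | h'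
      · exact absurd h'.symm hx
      · simp [List.idxOf?_cons, List.idxOf_cons, hx, ih h']

-- B: characterisation of the sorted head
lemma Bside (cs : List Char) (c0 : Char) (t : List Char) (hcons : cs = c0 :: t) :
    ∃ m rt,
      PySem.List.sorted2
        (cs.foldl (fun (d : PySem.Dict Char Int) c => d.insert c (d.getD c 0 + 1)) PySem.Dict.empty).keys
        (fun c => -((cs.foldl (fun (d : PySem.Dict Char Int) c => d.insert c (d.getD c 0 + 1)) PySem.Dict.empty).getD c 0))
        (fun c => (((PySem.List.enumerate cs).foldl (fun (d : PySem.Dict Char Int) p => if d.contains p.2 then d else d.insert p.2 p.1) PySem.Dict.empty)).getD c 0)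
        = m :: rt
      ∧ Best cs m
      ∧ (cs.foldl (fun (d : PySem.Dict Char Int) c => d.insert c (d.getD c 0 + 1)) PySem.Dict.empty).getD m 0 = (cs.count m : Int) := by
  have hcc : cs.foldl (fun (d : PySem.Dict Char Int) c => d.insert c (d.getD c 0 + 1)) PySem.Dict.empty
      = PySem.Dict.counter cs := PySem.Dict.foldl_insert_getD_add_one_eq_counter cs
  rw [hcc, PySem.Dict.keys_counter]
  -- first-index lookups of members
  have hfiv : ∀ y ∈ cs, ((PySem.List.enumerate cs).foldl
      (fun (d : PySem.Dict Char Int) p => if d.contains p.2 then d else d.insert p.2 p.1)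
      PySem.Dict.empty).getD y 0 = (cs.idxOf y : Int) := by
    intro y hy
    rw [PySem.Dict.getD_eq_get?_getD, fi_get, PySem.Dict.get?_empty]
    rw [PySem.List.index?_eq_idxOf?, idxOf?_mem cs y hy]
    simp
  have hperm := PySem.List.sorted2_perm (PySem.Set.ofList cs)
      (fun c => -((PySem.Dict.counter cs).getD c 0))
      (fun c => (((PySem.List.enumerate cs).foldl (fun (d : PySem.Dict Char Int) p => if d.contains p.2 then d else d.insert p.2 p.1) PySem.Dict.empty)).getD c 0) false
  have hpair := sorted2_pairwise_le (PySem.Set.ofList cs)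
      (fun c => -((PySem.Dict.counter cs).getD c 0))
      (fun c => (((PySem.List.enumerate cs).foldl (fun (d : PySem.Dict Char Int) p => if d.contains p.2 then d else d.insert p.2 p.1) PySem.Dict.empty)).getD c 0)
  cases hx : PySem.List.sorted2 (PySem.Set.ofList cs)
      (fun c => -((PySem.Dict.counter cs).getD c 0))
      (fun c => (((PySem.List.enumerate cs).foldl (fun (d : PySem.Dict Char Int) p => if d.contains p.2 then d else d.insert p.2 p.1) PySem.Dict.empty)).getD c 0) false with
  | nil =>
    exfalso
    rw [hx] at hperm
    have hnil : PySem.Set.ofList cs = [] := hperm.symm.eq_nil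
    have : c0 ∈ PySem.Set.ofList cs := (PySem.Set.mem_ofList cs c0).mpr (by rw [hcons]; exact List.mem_cons_self ..)
    rw [hnil] at this
    simp at this
  | cons m rt =>
    rw [hx] at hperm hpair
    refine ⟨m, rt, rfl, ?_, ?_⟩
    · have hmks : m ∈ PySem.Set.ofList cs := hperm.mem_iff.mp (List.mem_cons_self ..)
      have hmcs : m ∈ cs := (PySem.Set.mem_ofList cs m).mp hmks
      refine ⟨hmcs, ?_⟩
      intro y hy
      have hyr : y ∈ m :: rt := hperm.mem_iff.mpr ((PySem.Set.mem_ofList cs y).mpr hy)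
      rcases List.mem_cons.mp hyr with rfl | hyrt
      · exact ⟨le_rfl, fun _ => le_rfl⟩
      · have hle := (List.pairwise_cons.mp hpair).1 y hyrt
        simp only [PySem.Dict.getD_counter] at hle
        rw [hfiv m hmcs, hfiv y hy] at hle
        constructor
        · rcases hle with h | ⟨h, _⟩ <;> omega
        · intro hcy
          rcases hle with h | ⟨_, h2⟩
          · omega
          · exact_mod_cast h2
    · have hmcs : m ∈ cs := (PySem.Set.mem_ofList cs m).mp (hperm.mem_iff.mp (List.mem_cons_self ..))
      rw [PySem.Dict.getD_counter]

-- ===== VERDICT (by name: the statement is the Claim_ definition above) =====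
theorem high_freq_spec : Claim_equal_high_freq := by
  unfold Claim_equal_high_freq
  intro s _ hpre
  unfold Spec_high_freq
  have hsl : s.toList ≠ [] := by simpa using hpre
  have hne : PySem.Chars.lower s.toList ≠ [] := by
    simp only [PySem.Chars.lower, ne_eq, List.map_eq_nil_iff]
    exact hsl
  obtain ⟨c0, t, hcons⟩ := List.exists_cons_of_ne_nil hne
  have hget : PySem.List.pyGet? (PySem.Chars.lower s.toList) 0 = some c0 := by
    rw [hcons]; simp [PySem.List.pyGet?, PySem.List.pyIdx?]
  obtain ⟨hBestA, hmaA⟩ :=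
    Aloop (PySem.Chars.lower s.toList) (PySem.Chars.lower s.toList) [] [] c0
      (PySem.Chars.count (PySem.Chars.lower s.toList) [c0] : Int)
      (by simp) (by simp)
      (by rw [hcons]; exact List.mem_cons_self ..)
      (by rw [count_singleton])
      (by simp) (by simp)
      (by rw [hcons]; simp)
  obtain ⟨m, rt, hx, hBestB, hcm⟩ := Bside (PySem.Chars.lower s.toList) c0 t hcons
  have hgetB : PySem.List.pyGet?
      (PySem.List.sorted2
        ((PySem.Chars.lower s.toList).foldl (fun (d : PySem.Dict Char Int) c => d.insert c (d.getD c 0 + 1)) PySem.Dict.empty).keys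
        (fun c => -(((PySem.Chars.lower s.toList).foldl (fun (d : PySem.Dict Char Int) c => d.insert c (d.getD c 0 + 1)) PySem.Dict.empty).getD c 0))
        (fun c => (((PySem.List.enumerate (PySem.Chars.lower s.toList)).foldl (fun (d : PySem.Dict Char Int) p => if d.contains p.2 then d else d.insert p.2 p.1) PySem.Dict.empty)).getD c 0))
      0 = some m := by
    rw [hx]; simp [PySem.List.pyGet?, PySem.List.pyIdx?]
  have hrm : ((PySem.Chars.lower s.toList).foldl (Astep (PySem.Chars.lower s.toList))
      ([], c0, (PySem.Chars.count (PySem.Chars.lower s.toList) [c0] : Int))).2.1 = m :=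
    Best_unique hBestA hBestB
  simp only [high_freq, high_freq_alt, hget, hgetB]
  rw [hmaA, hrm, hcm]
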